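-- pv_equiv track=rewrite | github.com/2514716492zzy-dotcom/Car | follower_fall/voice_llm_speaker.py | has_fuzzy_dog_token
-- ===== SOURCE A (Python) =====
-- FUZZY_DOG_TOKENS = ("dog", "doggy", "doggie")
--
-- def edit_distance(a: str, b: str) -> int:
--     """Compute Levenshtein distance for short wake-word tokens."""
--     if a == b:
--         return 0
--     if not a:
--         return len(b)
--     if not b:
--         return len(a)
--
--     prev = list(range(len(b) + 1))
--     for i, ca in enumerate(a, start=1):
--         curr = [i]
--         for j, cb in enumerate(b, start=1):
--             cost = 0 if ca == cb else 1
--             curr.append(min(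
--                 prev[j] + 1,       # deletion
--                 curr[j - 1] + 1,   # insertion
--                 prev[j - 1] + cost # substitution
--             ))
--         prev = curr
--     return prev[-1]
--
-- def has_fuzzy_dog_token(normalized_text: str) -> bool:
--     """
--     Allow minor misspellings near dog/doggy/doggie in first clause.
--     Examples: dogy, dogi, doogie, daggy (distance <= 1~2 by length).
--     """
--     for token in normalized_text.split():
--         # Keep token check focused and cheap.
--         if len(token) < 3 or len(token) > 10:
--             continue
--         if token.startswith("dog"):
--             return True
--         for target in FUZZY_DOG_TOKENS:
--             max_dist = 1 if len(target) <= 4 else 2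
--             if abs(len(token) - len(target)) <= max_dist and edit_distance(token, target) <= max_dist:
--                 return True
--     return False
-- ===== SOURCE B (Python) =====
-- FUZZY_DOG_TOKENS = ("dog", "doggy", "doggie")
--
-- def edit_distance(a: str, b: str) -> int:
--     """Levenshtein distance by memoized recursion on prefixes (last characters)."""
--     memo = {}
--
--     def d(i: int, j: int) -> int:
--         key = (i, j)
--         if key in memo:
--             return memo[key]
--         if i == 0:
--             r = j
--         elif j == 0:
--             r = i
--         elif a[i - 1] == b[j - 1]:
--             r = d(i - 1, j - 1)
--         else:
--             r = 1 + min(d(i - 1, j), d(i, j - 1), d(i - 1, j - 1))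
--         memo[key] = r
--         return r
--
--     return d(len(a), len(b))
--
-- def _token_hits(token: str) -> bool:
--     n = len(token)
--     if not (3 <= n <= 10):
--         return False
--     if token.startswith("dog"):
--         return True
--     return any(
--         abs(n - len(target)) <= (1 if len(target) <= 4 else 2)
--         and edit_distance(token, target) <= (1 if len(target) <= 4 else 2)
--         for target in FUZZY_DOG_TOKENS
--     )
--
-- def has_fuzzy_dog_token(normalized_text: str) -> bool:
--     return any(_token_hits(token) for token in normalized_text.split())
-- ===== Notes on version B (the rewrite author's own statement) =====
-- stated objective: alternative
-- what changed: edit_distance's bottom-up DP row iteration is replaced by a memoized top-down recursion on prefix lengths (branching on the last characters), and the explicit token/target loops with continue/early-return are replaced by any() over generators.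
import Mathlib
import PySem

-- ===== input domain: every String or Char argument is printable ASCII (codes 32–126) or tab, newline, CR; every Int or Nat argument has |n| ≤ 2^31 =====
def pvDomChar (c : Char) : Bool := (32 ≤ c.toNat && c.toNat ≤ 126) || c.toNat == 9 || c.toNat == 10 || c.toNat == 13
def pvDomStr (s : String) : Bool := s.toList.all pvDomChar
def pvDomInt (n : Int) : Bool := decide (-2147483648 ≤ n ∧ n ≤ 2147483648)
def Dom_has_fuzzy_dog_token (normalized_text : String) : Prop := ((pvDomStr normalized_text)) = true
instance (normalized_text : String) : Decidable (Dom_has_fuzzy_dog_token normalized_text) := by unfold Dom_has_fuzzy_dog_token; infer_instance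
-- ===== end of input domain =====

-- B replaces A's bottom-up DP row loop in edit_distance by a memoized top-down recursion on
-- prefixes (branching on the last characters) and A's explicit token/target loops with
-- early return by any() over generators; same return value, similar cost ("alternative").

-- ===== PORT A =====
def FUZZY_DOG_TOKENS : List String := ["dog", "doggy", "doggie"]

-- inner loop body of A's DP: j = q.2 + 1 (enumerate(b, start=1)); all list indices are
-- in range in every call the fold makes, so Python's curr[j-1]/prev[j] indexing is getD here
def stepA (prev : List Int) (ca : Char) (curr : List Int) (q : Char × Nat) : List Int :=
  let cb := q.1
  let j := q.2 + 1
  let cost : Int := if ca = cb then 0 else 1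
  curr ++ [min (prev.getD j 0 + 1) (min (curr.getD (j - 1) 0 + 1) (prev.getD (j - 1) 0 + cost))]

def edit_distance (a b : String) : Int :=
  if a = b then 0
  else if a = "" then PySem.Str.len b
  else if b = "" then PySem.Str.len a
  else
    let al := a.toList
    let bl := b.toList
    let prev0 : List Int := PySem.List.pyRange 0 (PySem.Str.len b + 1) 1
    let last := al.zipIdx.foldl
      (fun prev (p : Char × Nat) => bl.zipIdx.foldl (stepA prev p.1) [(p.2 : Int) + 1])
      prev0
    (PySem.List.pyGet? last (-1)).getD 0   -- prev[-1]; last is never empty, so getD's default is unused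

-- A's inner 'for target in FUZZY_DOG_TOKENS' loop with early return
def checkTargets (token : String) : List String → Bool
  | [] => false
  | tg :: rest =>
    let md : Int := if PySem.Str.len tg ≤ 4 then 1 else 2
    if |PySem.Str.len token - PySem.Str.len tg| ≤ md ∧ edit_distance token tg ≤ md then true
    else checkTargets token rest

-- A's outer 'for token in normalized_text.split()' loop with continue / early return
def loopTokens : List String → Bool
  | [] => false
  | tok :: rest =>
    if PySem.Str.len tok < 3 ∨ PySem.Str.len tok > 10 then loopTokens rest
    else if PySem.Str.startswith tok "dog" then true
    else if checkTargets tok FUZZY_DOG_TOKENS then true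
    else loopTokens rest

def has_fuzzy_dog_token (normalized_text : String) : Bool :=
  loopTokens (PySem.Str.split₀ normalized_text)

-- ===== PORT B =====
-- Source B's memoized d(i, j) (distance of a[:i] and b[:j]); the memo only speeds evaluation,
-- the recursion structure is this one.  a[i-1]/b[j-1] are in range on every reachable
-- call, so the indexing is getD here.
def lev (al bl : List Char) : Nat → Nat → Nat
  | 0, j => j
  | i + 1, 0 => i + 1
  | i + 1, j + 1 =>
    if al.getD i ' ' = bl.getD j ' ' then lev al bl i j
    else 1 + min (lev al bl i (j + 1)) (min (lev al bl (i + 1) j) (lev al bl i j))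
  termination_by i j => (i, j)

def edit_distance_alt (a b : String) : Int :=
  (lev a.toList b.toList a.toList.length b.toList.length : Int)

-- Source B's _token_hits
def token_hits (token : String) : Bool :=
  let n := PySem.Str.len token
  if ¬ (3 ≤ n ∧ n ≤ 10) then false
  else if PySem.Str.startswith token "dog" then true
  else FUZZY_DOG_TOKENS.any fun target =>
    decide (|n - PySem.Str.len target| ≤ (if PySem.Str.len target ≤ 4 then 1 else 2)) &&
    decide (edit_distance_alt token target ≤ (if PySem.Str.len target ≤ 4 then 1 else 2))

def has_fuzzy_dog_token_alt (normalized_text : String) : Bool :=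
  (PySem.Str.split₀ normalized_text).any token_hits

-- ===== PRECONDITION & SPEC =====
def Spec_has_fuzzy_dog_token (normalized_text : String) (out : Bool) : Prop := out = has_fuzzy_dog_token_alt normalized_text
instance (normalized_text : String) (out : Bool) : Decidable (Spec_has_fuzzy_dog_token normalized_text out) := by unfold Spec_has_fuzzy_dog_token; infer_instance

-- ===== CLAIM (what is proved, stated in full; the proofs are below) =====
def Claim_equal_has_fuzzy_dog_token : Prop := ∀ (normalized_text : String), Dom_has_fuzzy_dog_token normalized_text → Spec_has_fuzzy_dog_token normalized_text (has_fuzzy_dog_token normalized_text)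

-- ===== LEMMAS AND PROOFS =====

theorem lev_self (al : List Char) : ∀ i, lev al al i i = 0 := by
  intro i; induction i with
  | zero => simp [lev]
  | succ k ih => simp [lev, ih]

theorem lev_right_nil (al : List Char) : ∀ n, lev al [] n 0 = n := by
  intro n; cases n <;> simp [lev]

-- DP row i of A: the distances of a[:i] to all prefixes of b, as Ints (proof-only helper)
def rowI (al bl : List Char) (i : Nat) : List Int :=
  (List.range (bl.length + 1)).map (fun j => (lev al bl i j : Int))

theorem lev_zero_left (al bl : List Char) (j : Nat) : lev al bl 0 j = j := by simp [lev]

theorem lev_zero_right (al bl : List Char) (i : Nat) : lev al bl (i + 1) 0 = i + 1 := by simp [lev]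

theorem lev_succ_succ (al bl : List Char) (i j : Nat) :
    lev al bl (i + 1) (j + 1) =
      if al.getD i ' ' = bl.getD j ' ' then lev al bl i j
      else 1 + min (lev al bl i (j + 1)) (min (lev al bl (i + 1) j) (lev al bl i j)) := by
  rw [lev]


theorem lev_lb (al bl : List Char) : ∀ n i j, i + j ≤ n →
    i ≤ lev al bl i j + j ∧ j ≤ lev al bl i j + i := by
  intro n
  induction n with
  | zero =>
    intro i j h
    have hi : i = 0 := by omega
    have hj : j = 0 := by omega
    subst hi hj; simp [lev_zero_left]
  | succ n ih =>
    intro i j h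
    match i, j with
    | 0, j => simp [lev_zero_left]
    | i + 1, 0 => simp [lev_zero_right]
    | i + 1, j + 1 =>
      have h1 := ih i j (by omega)
      have h2 := ih i (j + 1) (by omega)
      have h3 := ih (i + 1) j (by omega)
      rw [lev_succ_succ]
      split_ifs with hc <;> omega


theorem lev_adj (al bl : List Char) : ∀ n i j, i + j ≤ n →
    lev al bl i j ≤ lev al bl i (j + 1) + 1 ∧ lev al bl i j ≤ lev al bl (i + 1) j + 1 := by
  intro n
  induction n with
  | zero =>
    intro i j h
    have hi : i = 0 := by omega
    have hj : j = 0 := by omega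
    subst hi hj
    have h1 := lev_lb al bl 1 1 0 (by omega)
    simp only [Nat.zero_add, lev_zero_left] at *
    omega
  | succ n ih =>
    intro i j h
    match i, j with
    | 0, j =>
      have h1 := lev_lb al bl (j + 1) 1 j (by omega)
      simp only [Nat.zero_add, lev_zero_left]
      omega
    | i + 1, 0 =>
      have h1 := lev_lb al bl (i + 2) (i + 1) 1 (by omega)
      have h2 := lev_lb al bl (i + 3) (i + 2) 0 (by omega)
      simp only [Nat.zero_add, lev_zero_right]
      omega
    | i + 1, j + 1 =>
      have A1 := (ih i j (by omega)).1
      have A2 := (ih i (j + 1) (by omega)).1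
      have B1 := (ih i j (by omega)).2
      have B2 := (ih (i + 1) j (by omega)).2
      refine ⟨?_, ?_⟩
      · rw [lev_succ_succ al bl i j, lev_succ_succ al bl i (j + 1)]
        split_ifs with hq hr hr
        · omega
        · have e := lev_succ_succ al bl i j
          rw [if_pos hq] at e
          omega
        · omega
        · have e := lev_succ_succ al bl i j
          rw [if_neg hq] at e
          omega
      · rw [lev_succ_succ al bl i j, lev_succ_succ al bl (i + 1) j]
        split_ifs with hq hr hr
        · omega
        · have e := lev_succ_succ al bl i j
          rw [if_pos hq] at e
          omega
        · omega
        · have e := lev_succ_succ al bl i j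
          rw [if_neg hq] at e
          omega

theorem rowI_getD (al bl : List Char) (i j : Nat) (h : j ≤ bl.length) :
    (rowI al bl i).getD j 0 = (lev al bl i j : Int) := by
  unfold rowI
  exact PySem.List.getD_map_range _ _ _ _ (by omega)


theorem inner_fold (al bl : List Char) (ca : Char) (i : Nat) (hca : ca = al.getD i ' ') :
    ∀ (suf : List Char) (k : Nat), suf = bl.drop k → k ≤ bl.length →
      List.foldl (stepA (rowI al bl i) ca)
        ((List.range (k + 1)).map (fun j => (lev al bl (i + 1) j : Int)))
        (suf.zipIdx k)
      = rowI al bl (i + 1) := by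
  intro suf
  induction suf with
  | nil =>
    intro k hdrop hk
    have : k = bl.length := by
      have := congrArg List.length hdrop
      simp [List.length_drop] at this
      omega
    subst this
    simp [rowI]
  | cons cb suf ih =>
    intro k hdrop hk
    have hklt : k < bl.length := by
      by_contra hge
      rw [List.drop_eq_nil_of_le (by omega)] at hdrop
      exact (List.cons_ne_nil _ _) hdrop
    rw [List.drop_eq_getElem_cons hklt] at hdrop
    obtain ⟨hcb0, hsuf⟩ := List.cons_eq_cons.mp hdrop
    have hcb : cb = bl.getD k ' ' := by
      rw [hcb0]
      simp [List.getD, List.getElem?_eq_getElem hklt]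
    rw [List.zipIdx_cons, List.foldl_cons]
    have hstep : stepA (rowI al bl i) ca
        ((List.range (k + 1)).map (fun j => (lev al bl (i + 1) j : Int))) (cb, k)
        = (List.range (k + 1 + 1)).map (fun j => (lev al bl (i + 1) j : Int)) := by
      unfold stepA
      simp only [Nat.add_sub_cancel]
      have e1 : (rowI al bl i).getD (k + 1) 0 = (lev al bl i (k + 1) : Int) :=
        rowI_getD al bl i (k + 1) (by omega)
      have e2 : (rowI al bl i).getD k 0 = (lev al bl i k : Int) :=
        rowI_getD al bl i k (by omega)
      have e3 : ((List.range (k + 1)).map (fun j => (lev al bl (i + 1) j : Int))).getD k 0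
          = (lev al bl (i + 1) k : Int) :=
        PySem.List.getD_map_range _ _ _ _ (by omega)
      rw [e1, e2, e3, List.range_succ (n := k + 1), List.map_append]
      congr 1
      simp only [List.map_cons, List.map_nil]
      congr 1
      have hrec := lev_succ_succ al bl i k
      have hadj := lev_adj al bl (i + k) i k (le_refl _)
      rw [← hca, ← hcb] at hrec
      by_cases hc : ca = cb
      · rw [if_pos hc] at hrec ⊢
        rw [hrec]
        omega
      · rw [if_neg hc] at hrec ⊢
        rw [hrec]
        push_cast
        omega
    rw [hstep, ih (k + 1) hsuf (by omega)]


theorem outer_fold (al bl : List Char) : ∀ (suf : List Char) (k : Nat), suf = al.drop k → k ≤ al.length →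
    List.foldl (fun prev (p : Char × Nat) => List.foldl (stepA prev p.1) [(p.2 : Int) + 1] bl.zipIdx)
      (rowI al bl k) (suf.zipIdx k)
    = rowI al bl al.length := by
  intro suf
  induction suf with
  | nil =>
    intro k hdrop hk
    have : k = al.length := by
      have := congrArg List.length hdrop
      simp [List.length_drop] at this
      omega
    subst this
    simp
  | cons ca suf ih =>
    intro k hdrop hk
    have hklt : k < al.length := by
      by_contra hge
      rw [List.drop_eq_nil_of_le (by omega)] at hdrop
      exact (List.cons_ne_nil _ _) hdrop
    rw [List.drop_eq_getElem_cons hklt] at hdrop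
    obtain ⟨hcb0, hsuf⟩ := List.cons_eq_cons.mp hdrop
    have hcb : ca = al.getD k ' ' := by
      rw [hcb0]
      simp [List.getD, List.getElem?_eq_getElem hklt]
    rw [List.zipIdx_cons, List.foldl_cons]
    have hinit : [((k : Nat) : Int) + 1] = (List.range (0 + 1)).map (fun j => (lev al bl (k + 1) j : Int)) := by
      simp [lev]
    have hinner := inner_fold al bl ca k hcb bl 0 (by simp) (by omega)
    rw [show (bl.zipIdx : List (Char × Nat)) = bl.zipIdx 0 from rfl] at hinner ⊢
    simp only [] at *
    rw [hinit] at *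
    rw [hinner]
    exact ih (k + 1) hsuf (by omega)


theorem rowI_getLast? (al bl : List Char) (i : Nat) :
    (rowI al bl i).getLast? = some ((lev al bl i bl.length : Nat) : Int) := by
  unfold rowI
  rw [List.range_succ, List.map_append]
  simp


theorem ed_eq (a b : String) : edit_distance a b = edit_distance_alt a b := by
  unfold edit_distance edit_distance_alt
  by_cases hab : a = b
  · subst hab
    rw [if_pos rfl, lev_self]
    simp
  · rw [if_neg hab]
    by_cases ha : a = ""
    · subst ha
      rw [if_pos rfl]
      simp [lev_zero_left]
    · rw [if_neg ha]
      by_cases hb : b = ""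
      · subst hb
        rw [if_pos rfl]
        have h0 : ("" : String).toList = [] := rfl
        simp only [h0, List.length_nil, lev_right_nil, PySem.Str.len_eq]
      · rw [if_neg hb]
        simp only []
        have hprev0 : PySem.List.pyRange 0 (PySem.Str.len b + 1) 1 = rowI a.toList b.toList 0 := by
          rw [PySem.List.pyRange_one]
          unfold rowI
          simp only [PySem.Str.len_eq, lev_zero_left]
          norm_num
        rw [hprev0, outer_fold a.toList b.toList a.toList 0 rfl (by omega),
            PySem.List.pyGet?_neg_one, rowI_getLast?]
        rfl

theorem check_eq (tok : String) : ∀ ts : List String,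
    checkTargets tok ts = ts.any (fun target =>
      decide (|PySem.Str.len tok - PySem.Str.len target| ≤ (if PySem.Str.len target ≤ 4 then 1 else 2)) &&
      decide (edit_distance_alt tok target ≤ (if PySem.Str.len target ≤ 4 then 1 else 2))) := by
  intro ts
  induction ts with
  | nil => rfl
  | cons tg rest ih =>
    rw [List.any_cons, ← ih]
    show (if |PySem.Str.len tok - PySem.Str.len tg| ≤ (if PySem.Str.len tg ≤ 4 then (1 : Int) else 2) ∧
            edit_distance tok tg ≤ (if PySem.Str.len tg ≤ 4 then (1 : Int) else 2)
          then true else checkTargets tok rest) = _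
    rw [ed_eq]
    by_cases h : |PySem.Str.len tok - PySem.Str.len tg| ≤ (if PySem.Str.len tg ≤ 4 then (1 : Int) else 2) ∧
        edit_distance_alt tok tg ≤ (if PySem.Str.len tg ≤ 4 then (1 : Int) else 2)
    · rw [if_pos h]
      simp at h
      simp [h.1, h.2]
    · rw [if_neg h]
      rw [not_and_or] at h
      rcases h with h | h <;> simp at h <;> simp [h]

theorem loop_eq : ∀ toks : List String, loopTokens toks = toks.any token_hits := by
  intro toks
  induction toks with
  | nil => rfl
  | cons tok rest ih =>
    rw [List.any_cons]
    show (if PySem.Str.len tok < 3 ∨ PySem.Str.len tok > 10 then loopTokens rest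
          else if PySem.Str.startswith tok "dog" then true
          else if checkTargets tok FUZZY_DOG_TOKENS then true
          else loopTokens rest) = (token_hits tok || rest.any token_hits)
    rw [← ih]
    show _ = ((if ¬(3 ≤ PySem.Str.len tok ∧ PySem.Str.len tok ≤ 10) then false
          else if PySem.Str.startswith tok "dog" then true
          else FUZZY_DOG_TOKENS.any fun target =>
            decide (|PySem.Str.len tok - PySem.Str.len target| ≤ (if PySem.Str.len target ≤ 4 then 1 else 2)) &&
            decide (edit_distance_alt tok target ≤ (if PySem.Str.len target ≤ 4 then 1 else 2))) ||
        loopTokens rest)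
    rw [← check_eq tok FUZZY_DOG_TOKENS]
    by_cases hg : PySem.Str.len tok < 3 ∨ PySem.Str.len tok > 10
    · rw [if_pos hg, if_pos (show ¬(3 ≤ PySem.Str.len tok ∧ PySem.Str.len tok ≤ 10) from by omega)]
      simp
    · rw [if_neg hg,
          if_neg (not_not_intro (show 3 ≤ PySem.Str.len tok ∧ PySem.Str.len tok ≤ 10 from by omega))]
      cases hs : PySem.Str.startswith tok "dog" <;>
        cases hc : checkTargets tok FUZZY_DOG_TOKENS <;> simp [*]

-- ===== VERDICT (by name: the statement is the Claim_ definition above) =====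
theorem has_fuzzy_dog_token_spec : Claim_equal_has_fuzzy_dog_token := by
  intro t _
  unfold Spec_has_fuzzy_dog_token has_fuzzy_dog_token has_fuzzy_dog_token_alt
  exact loop_eq _
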